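-- pv_equiv track=rewrite | github.com/ArvindAkula/ai_math_tutor | math-engine/handwriting_recognition.py | _tokenize_mathematical_expression
-- ===== SOURCE A (Python) =====
-- from typing import Dict, List, Optional, Tuple, Union
--
-- def _tokenize_mathematical_expression(text: str) -> List[str]:
--     """Tokenize mathematical expression into symbols"""
--     # Simple tokenization - in production, this would be more sophisticated
--     tokens = []
--     current_token = ""
--
--     for char in text:
--         if char.isalnum() or char in "αβγδεθλμπσφψω":
--             current_token += char
--         else:
--             if current_token:
--                 tokens.append(current_token)
--                 current_token = ""
--             if char.strip():  # Non-whitespace operators/symbols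
--                 tokens.append(char)
--
--     if current_token:
--         tokens.append(current_token)
--
--     return tokens
-- ===== SOURCE B (Python) =====
-- from itertools import groupby
-- from typing import List
--
-- def _tokenize_mathematical_expression(text: str) -> List[str]:
--     """Tokenize mathematical expression into symbols"""
--     def label(c: str) -> int:
--         if c.isalnum() or c in "αβγδεθλμπσφψω":
--             return 0  # word
--         if not c.strip():
--             return 1  # whitespace
--         return 2      # operator/symbol
--
--     tokens: List[str] = []
--     for kind, run in groupby(text, key=label):
--         if kind == 0:
--             tokens.append("".join(run))
--         elif kind == 2:
--             tokens.extend(run)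
--     return tokens
-- ===== Notes on version B (the rewrite author's own statement) =====
-- stated objective: idiomatic
-- what changed: Replaced A's per-character accumulate-and-flush state machine with itertools.groupby over a three-way char classifier (word/whitespace/operator), emitting each maximal run at once.
import Mathlib
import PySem

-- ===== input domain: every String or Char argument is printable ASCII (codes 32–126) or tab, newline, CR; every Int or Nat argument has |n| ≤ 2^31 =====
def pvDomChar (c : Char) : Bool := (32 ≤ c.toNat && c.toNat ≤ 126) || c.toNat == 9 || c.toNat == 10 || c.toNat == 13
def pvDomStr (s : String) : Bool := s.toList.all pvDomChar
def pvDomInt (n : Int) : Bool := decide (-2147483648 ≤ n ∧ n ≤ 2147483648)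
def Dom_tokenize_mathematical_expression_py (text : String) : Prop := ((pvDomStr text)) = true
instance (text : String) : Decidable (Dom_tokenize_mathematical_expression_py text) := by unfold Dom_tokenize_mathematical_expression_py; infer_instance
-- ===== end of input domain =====

-- B replaces A's manual accumulate-and-flush loop by grouping the text into maximal
-- runs of same-class characters (word / whitespace / operator) and emitting each run
-- at once (itertools.groupby in Source B); objective: idiomatic, same cost.

-- ===== PORT A =====
-- char.isalnum() or char in "αβγδεθλμπσφψω"
def pvWordChar (c : Char) : Bool :=
  PySem.Chars.isalnum c || ("αβγδεθλμπσφψω".toList.contains c)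

def tokenize_mathematical_expression_py (text : String) : List String :=
  let st := text.toList.foldl (fun (st : List String × List Char) char =>
    if pvWordChar char then
      (st.1, st.2 ++ [char])
    else
      let tokens := if st.2.isEmpty then st.1 else st.1 ++ [String.mk st.2]
      -- char.strip() nonempty ↔ char is not whitespace
      let tokens := if PySem.Chars.isspace char then tokens else tokens ++ [String.mk [char]]
      (tokens, [])) ([], [])
  if st.2.isEmpty then st.1 else st.1 ++ [String.mk st.2]

-- ===== PORT B =====
-- label: 0 = word char, 1 = whitespace, 2 = operator/symbol
def pvLabel (c : Char) : Nat :=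
  if pvWordChar c then 0 else if PySem.Chars.isspace c then 1 else 2

-- itertools.groupby(text, key=pvLabel): maximal runs of equal label
def pvGroupBy : List Char → List (Nat × List Char)
  | [] => []
  | c :: cs =>
      (pvLabel c, c :: cs.takeWhile (fun d => pvLabel d == pvLabel c)) ::
        pvGroupBy (cs.dropWhile (fun d => pvLabel d == pvLabel c))
termination_by l => l.length
decreasing_by
  exact Nat.lt_succ_of_le (List.length_dropWhile_le _ _)

def tokenize_mathematical_expression_py_alt (text : String) : List String :=
  (pvGroupBy text.toList).foldl (fun tokens kr =>
    if kr.1 = 0 then tokens ++ [String.mk kr.2]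
    else if kr.1 = 2 then tokens ++ kr.2.map (fun c => String.mk [c])
    else tokens) []

-- ===== PRECONDITION & SPEC =====
def Spec_tokenize_mathematical_expression_py (text : String) (out : List String) : Prop := out = tokenize_mathematical_expression_py_alt text
instance (text : String) (out : List String) : Decidable (Spec_tokenize_mathematical_expression_py text out) := by unfold Spec_tokenize_mathematical_expression_py; infer_instance

-- ===== CLAIM (what is proved, stated in full; the proofs are below) =====
def Claim_equal_tokenize_mathematical_expression_py : Prop := ∀ (text : String), Dom_tokenize_mathematical_expression_py text → Spec_tokenize_mathematical_expression_py text (tokenize_mathematical_expression_py text)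

-- ===== LEMMAS AND PROOFS =====

-- common characterisation of the token stream: A's loop state (tokens, cur) folded out
def pvEmit (cur : List Char) : List Char → List String
  | [] => if cur.isEmpty then [] else [String.mk cur]
  | c :: cs =>
      if pvWordChar c then pvEmit (cur ++ [c]) cs
      else (if cur.isEmpty then [] else [String.mk cur]) ++
           (if PySem.Chars.isspace c then [] else [String.mk [c]]) ++ pvEmit [] cs

theorem pvA_foldl (l : List Char) : ∀ (toks : List String) (cur : List Char),
    (let st := l.foldl (fun (st : List String × List Char) char =>
      if pvWordChar char then
        (st.1, st.2 ++ [char])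
      else
        let tokens := if st.2.isEmpty then st.1 else st.1 ++ [String.mk st.2]
        let tokens := if PySem.Chars.isspace char then tokens else tokens ++ [String.mk [char]]
        (tokens, [])) (toks, cur)
     if st.2.isEmpty then st.1 else st.1 ++ [String.mk st.2])
    = toks ++ pvEmit cur l := by
  induction l with
  | nil =>
    intro toks cur
    simp only [List.foldl_nil, pvEmit]
    split <;> simp
  | cons c cs ih =>
    intro toks cur
    simp only [List.foldl_cons, pvEmit]
    by_cases hw : pvWordChar c
    · simp only [hw, if_pos]
      exact ih toks (cur ++ [c])
    · simp only [hw, if_false, Bool.false_eq_true]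
      by_cases hs : PySem.Chars.isspace c
      · simp only [hs, if_true]
        rw [ih]
        split <;> simp
      · simp only [hs, if_false, Bool.false_eq_true]
        rw [ih]
        split <;> simp

theorem pvEmit_word_run (run : List Char) : ∀ (cur cs : List Char),
    (∀ d ∈ run, pvWordChar d = true) →
    pvEmit cur (run ++ cs) = pvEmit (cur ++ run) cs := by
  induction run with
  | nil => intro cur cs _; simp
  | cons d ds ih =>
    intro cur cs h
    have hd : pvWordChar d = true := h d (by simp)
    simp only [List.cons_append, pvEmit, hd, if_true]
    rw [ih (cur ++ [d]) cs (fun x hx => h x (by simp [hx]))]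
    simp

theorem pvEmit_flush (cur cs : List Char) (hne : cur ≠ [])
    (hcs : cs = [] ∨ ∃ d ds, cs = d :: ds ∧ pvWordChar d = false) :
    pvEmit cur cs = String.mk cur :: pvEmit [] cs := by
  rcases hcs with h | ⟨d, ds, rfl, hd⟩
  · subst h; simp [pvEmit, hne]
  · simp [pvEmit, hd, hne]

theorem pvEmit_ws_run (run : List Char) : ∀ (cs : List Char),
    (∀ d ∈ run, pvWordChar d = false ∧ PySem.Chars.isspace d = true) →
    pvEmit [] (run ++ cs) = pvEmit [] cs := by
  induction run with
  | nil => intro cs _; simp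
  | cons d ds ih =>
    intro cs h
    obtain ⟨hw, hs⟩ := h d (by simp)
    simp only [List.cons_append, pvEmit, hw, hs]
    simpa using ih cs (fun x hx => h x (by simp [hx]))

theorem pvEmit_op_run (run : List Char) : ∀ (cs : List Char),
    (∀ d ∈ run, pvWordChar d = false ∧ PySem.Chars.isspace d = false) →
    pvEmit [] (run ++ cs) = run.map (fun c => String.mk [c]) ++ pvEmit [] cs := by
  induction run with
  | nil => intro cs _; simp
  | cons d ds ih =>
    intro cs h
    obtain ⟨hw, hs⟩ := h d (by simp)
    simp only [List.cons_append, pvEmit, hw, hs]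
    rw [ih cs (fun x hx => h x (by simp [hx]))]
    simp

theorem pvLabel_eq_zero (d : Char) : (pvLabel d == 0) = pvWordChar d := by
  simp only [pvLabel]; split_ifs <;> simp_all

theorem pvLabel_eq_one (d : Char) :
    (pvLabel d == 1) = (!pvWordChar d && PySem.Chars.isspace d) := by
  simp only [pvLabel]; split_ifs <;> simp_all

theorem pvLabel_eq_two (d : Char) :
    (pvLabel d == 2) = (!pvWordChar d && !PySem.Chars.isspace d) := by
  simp only [pvLabel]; split_ifs <;> simp_all

-- the B side as a flatMap over the runs
def pvGroupOut (gs : List (Nat × List Char)) : List String :=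
  gs.flatMap (fun kr =>
    if kr.1 = 0 then [String.mk kr.2]
    else if kr.1 = 2 then kr.2.map (fun c => String.mk [c])
    else [])

theorem pvEmit_eq_groupOut (l : List Char) : pvEmit [] l = pvGroupOut (pvGroupBy l) := by
  induction l using pvGroupBy.induct with
  | case1 => simp [pvGroupBy, pvGroupOut, pvEmit]
  | case2 c cs ih =>
    rw [pvGroupBy]
    by_cases hw : pvWordChar c
    · have hc : pvLabel c = 0 := by simp [pvLabel, hw]
      have hpred : (fun d => pvLabel d == pvLabel c) = (fun d => pvWordChar d) := by
        funext d; rw [hc]; exact pvLabel_eq_zero d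
      rw [hpred] at ih ⊢
      have hrun : ∀ d ∈ cs.takeWhile (fun d => pvWordChar d), pvWordChar d = true :=
        fun d hd => List.mem_takeWhile_imp hd
      have hsplit : cs = cs.takeWhile (fun d => pvWordChar d) ++ cs.dropWhile (fun d => pvWordChar d) :=
        (List.takeWhile_append_dropWhile).symm
      have hhead : cs.dropWhile (fun d => pvWordChar d) = [] ∨
          ∃ d ds, cs.dropWhile (fun d => pvWordChar d) = d :: ds ∧ pvWordChar d = false := by
        cases hdw : cs.dropWhile (fun d => pvWordChar d) with
        | nil => exact Or.inl rfl
        | cons d ds =>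
          refine Or.inr ⟨d, ds, rfl, ?_⟩
          have := List.head_dropWhile_not (fun d => pvWordChar d) (l := cs)
            (by simp [hdw])
          simpa [hdw] using this
      calc pvEmit [] (c :: cs)
          = pvEmit [c] cs := by simp [pvEmit, hw]
        _ = pvEmit [c] (cs.takeWhile (fun d => pvWordChar d) ++ cs.dropWhile (fun d => pvWordChar d)) := by
              rw [← hsplit]
        _ = pvEmit (c :: cs.takeWhile (fun d => pvWordChar d)) (cs.dropWhile (fun d => pvWordChar d)) := by
              rw [pvEmit_word_run _ _ _ hrun]; rfl
        _ = String.mk (c :: cs.takeWhile (fun d => pvWordChar d)) ::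
              pvEmit [] (cs.dropWhile (fun d => pvWordChar d)) := by
              exact pvEmit_flush _ _ (by simp) hhead
        _ = pvGroupOut ((pvLabel c, c :: cs.takeWhile (fun d => pvWordChar d)) ::
              pvGroupBy (cs.dropWhile (fun d => pvWordChar d))) := by
              rw [ih]; simp [pvGroupOut, hc]
    · by_cases hs : PySem.Chars.isspace c
      · have hc : pvLabel c = 1 := by simp [pvLabel, hw, hs]
        have hpred : (fun d => pvLabel d == pvLabel c)
            = (fun d => !pvWordChar d && PySem.Chars.isspace d) := by
          funext d; rw [hc]; exact pvLabel_eq_one d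
        rw [hpred] at ih ⊢
        have hrun : ∀ d ∈ cs.takeWhile (fun d => !pvWordChar d && PySem.Chars.isspace d),
            pvWordChar d = false ∧ PySem.Chars.isspace d = true := by
          intro d hd
          have := List.mem_takeWhile_imp hd
          simpa using this
        calc pvEmit [] (c :: cs)
            = pvEmit [] cs := by simp [pvEmit, hw, hs]
          _ = pvEmit [] (cs.takeWhile (fun d => !pvWordChar d && PySem.Chars.isspace d)
                ++ cs.dropWhile (fun d => !pvWordChar d && PySem.Chars.isspace d)) := by
                rw [List.takeWhile_append_dropWhile]
          _ = pvEmit [] (cs.dropWhile (fun d => !pvWordChar d && PySem.Chars.isspace d)) := by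
                exact pvEmit_ws_run _ _ hrun
          _ = pvGroupOut ((pvLabel c, c :: cs.takeWhile (fun d => !pvWordChar d && PySem.Chars.isspace d)) ::
                pvGroupBy (cs.dropWhile (fun d => !pvWordChar d && PySem.Chars.isspace d))) := by
                rw [ih]; simp [pvGroupOut, hc]
      · have hc : pvLabel c = 2 := by simp [pvLabel, hw, hs]
        have hpred : (fun d => pvLabel d == pvLabel c)
            = (fun d => !pvWordChar d && !PySem.Chars.isspace d) := by
          funext d; rw [hc]; exact pvLabel_eq_two d
        rw [hpred] at ih ⊢
        have hrun : ∀ d ∈ cs.takeWhile (fun d => !pvWordChar d && !PySem.Chars.isspace d),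
            pvWordChar d = false ∧ PySem.Chars.isspace d = false := by
          intro d hd
          have := List.mem_takeWhile_imp hd
          simpa using this
        calc pvEmit [] (c :: cs)
            = String.mk [c] :: pvEmit [] cs := by simp [pvEmit, hw, hs]
          _ = String.mk [c] :: pvEmit [] (cs.takeWhile (fun d => !pvWordChar d && !PySem.Chars.isspace d)
                ++ cs.dropWhile (fun d => !pvWordChar d && !PySem.Chars.isspace d)) := by
                rw [List.takeWhile_append_dropWhile]
          _ = String.mk [c] :: ((cs.takeWhile (fun d => !pvWordChar d && !PySem.Chars.isspace d)).map
                  (fun c => String.mk [c])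
                ++ pvEmit [] (cs.dropWhile (fun d => !pvWordChar d && !PySem.Chars.isspace d))) := by
                rw [pvEmit_op_run _ _ hrun]
          _ = pvGroupOut ((pvLabel c, c :: cs.takeWhile (fun d => !pvWordChar d && !PySem.Chars.isspace d)) ::
                pvGroupBy (cs.dropWhile (fun d => !pvWordChar d && !PySem.Chars.isspace d))) := by
                rw [ih]; simp [pvGroupOut, hc]

theorem pvAlt_foldl (gs : List (Nat × List Char)) : ∀ (acc : List String),
    gs.foldl (fun tokens kr =>
      if kr.1 = 0 then tokens ++ [String.mk kr.2]
      else if kr.1 = 2 then tokens ++ kr.2.map (fun c => String.mk [c])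
      else tokens) acc = acc ++ pvGroupOut gs := by
  induction gs with
  | nil => intro acc; simp [pvGroupOut]
  | cons g gs ih =>
    intro acc
    simp only [List.foldl_cons, pvGroupOut, List.flatMap_cons]
    rw [ih]
    split_ifs <;> simp [pvGroupOut]

theorem pvAlt_eq_groupOut (text : String) :
    tokenize_mathematical_expression_py_alt text = pvGroupOut (pvGroupBy text.toList) := by
  unfold tokenize_mathematical_expression_py_alt
  simpa using pvAlt_foldl (pvGroupBy text.toList) []

-- ===== VERDICT (by name: the statement is the Claim_ definition above) =====
theorem tokenize_mathematical_expression_py_spec : Claim_equal_tokenize_mathematical_expression_py := by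
  intro text _
  unfold Spec_tokenize_mathematical_expression_py
  rw [pvAlt_eq_groupOut, ← pvEmit_eq_groupOut]
  unfold tokenize_mathematical_expression_py
  simpa using pvA_foldl text.toList [] []
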